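-- pv_equiv track=rewrite | github.com/SteveArseneLee/codetree-TILs | 240310/양수 직사각형의 최대 크기/max-area-of-positive-rectangle.py | max_positive_rectangle
-- ===== SOURCE A (Python) =====
-- def max_positive_rectangle(grid):
--     n, m = len(grid), len(grid[0])
--     max_area = -1
--
--     # 모든 가능한 직사각형에 대해
--     for start_row in range(n):
--         for start_col in range(m):
--             for end_row in range(start_row, n):
--                 for end_col in range(start_col, m):
--                     all_positive = True
--                     # 직사각형 내 모든 값이 양수인지 확인
--                     for i in range(start_row, end_row + 1):
--                         for j in range(start_col, end_col + 1):
--                             if grid[i][j] <= 0: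
--                                 all_positive = False
--                                 break
--                         if not all_positive:
--                             break
--
--                     # 양수인 경우, 최대 크기 업데이트
--                     if all_positive:
--                         area = (end_row - start_row + 1) * (end_col - start_col + 1)
--                         max_area = max(max_area, area)
--
--     return max_area
-- ===== SOURCE B (Python) =====
-- def max_positive_rectangle(grid):
--     n, m = len(grid), len(grid[0])
--     best = -1
--     for top in range(n):
--         ok = [True] * m
--         for bottom in range(top, n):
--             row = grid[bottom]
--             ok = [o and x > 0 for o, x in zip(ok, row)]
--             h = bottom - top + 1
--             run = 0
--             for o in ok:
--                 if o:
--                     run += 1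
--                     if run * h > best:
--                         best = run * h
--                 else:
--                     run = 0
--     return best
-- ===== Notes on version B (the rewrite author's own statement) =====
-- stated objective: faster
-- what changed: Replaces A's enumeration of every rectangle with a full re-scan of its cells by a row-sweep that, for each top row, incrementally maintains per-column all-positive flags and takes the best run-length times height in one pass per row.
import Mathlib
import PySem

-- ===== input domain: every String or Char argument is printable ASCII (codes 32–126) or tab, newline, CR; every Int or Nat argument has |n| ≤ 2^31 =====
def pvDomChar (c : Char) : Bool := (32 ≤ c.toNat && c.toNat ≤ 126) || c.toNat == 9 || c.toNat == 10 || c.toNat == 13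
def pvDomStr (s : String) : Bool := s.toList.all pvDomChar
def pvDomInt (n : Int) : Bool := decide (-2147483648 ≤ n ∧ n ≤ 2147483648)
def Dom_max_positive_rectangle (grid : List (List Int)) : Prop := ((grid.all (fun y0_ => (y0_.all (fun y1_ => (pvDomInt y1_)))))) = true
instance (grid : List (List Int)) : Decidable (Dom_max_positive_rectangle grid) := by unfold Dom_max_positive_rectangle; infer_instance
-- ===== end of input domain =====

-- B replaces A's six-level brute force over all rectangles (O(n^3·m^3)) by an O(n^2·m)
-- sweep: for each top row it maintains per-column all-positive flags and scans runs.

-- ===== PORT A =====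
-- literal port of Source A, its four loops and the verification double loop split into
-- named helpers (one per loop nest); the broken-out double verification loop is the
-- `all`/`all` in prACheck (same result, early exit included); grid[i][j] is pyGetD,
-- in range under Pre_.
def prACheck (grid : List (List Int)) (sr sc er ec : Int) : Bool :=
  (PySem.List.pyRange sr (er+1) 1).all (fun i =>
    (PySem.List.pyRange sc (ec+1) 1).all (fun j =>
      decide (0 < PySem.List.pyGetD (PySem.List.pyGetD grid i []) j 0)))

def prAL4 (grid : List (List Int)) (m sr sc er acc : Int) : Int :=
  (PySem.List.pyRange sc m 1).foldl (fun acc ec =>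
    if prACheck grid sr sc er ec then max acc ((er - sr + 1) * (ec - sc + 1)) else acc) acc

def prAL3 (grid : List (List Int)) (n m sr sc acc : Int) : Int :=
  (PySem.List.pyRange sr n 1).foldl (fun acc er => prAL4 grid m sr sc er acc) acc

def prAL2 (grid : List (List Int)) (n m sr acc : Int) : Int :=
  (PySem.List.pyRange 0 m 1).foldl (fun acc sc => prAL3 grid n m sr sc acc) acc

def max_positive_rectangle (grid : List (List Int)) : Int :=
  let n : Int := grid.length
  let m : Int := (PySem.List.pyGetD grid 0 []).length
  (PySem.List.pyRange 0 n 1).foldl (fun acc sr => prAL2 grid n m sr acc) (-1)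

-- ===== PORT B =====
-- literal port of Source B, its three loops as named helpers; `[True]*m` is
-- List.replicate m.toNat true (m = len(grid[0]) >= 0), the comprehension over
-- zip(ok, row) is the map over st.2.zip row, and the run/best loop carries (run, best).
def prBScan (h b : Int) (ok : List Bool) : Int × Int :=
  ok.foldl (fun (rb : Int × Int) o =>
    if o then
      let run := rb.1 + 1
      (run, if run * h > rb.2 then run * h else rb.2)
    else (0, rb.2)) ((0 : Int), b)

def prBRow (grid : List (List Int)) (top : Int) (st : Int × List Bool) (bottom : Int) :
    Int × List Bool :=
  let row := PySem.List.pyGetD grid bottom []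
  let ok := (st.2.zip row).map (fun p => p.1 && decide (0 < p.2))
  let h : Int := bottom - top + 1
  let res := prBScan h st.1 ok
  (res.2, ok)

def prBTop (grid : List (List Int)) (n m best top : Int) : Int :=
  ((PySem.List.pyRange top n 1).foldl (prBRow grid top)
    ((best, List.replicate m.toNat true) : Int × List Bool)).1

def max_positive_rectangle_alt (grid : List (List Int)) : Int :=
  let n : Int := grid.length
  let m : Int := (PySem.List.pyGetD grid 0 []).length
  (PySem.List.pyRange 0 n 1).foldl (fun best top => prBTop grid n m best top) (-1)

-- ===== PRECONDITION & SPEC =====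
-- Pre_ excludes exactly the inputs on which A raises IndexError: the empty grid
-- (grid[0]) and grids with a row shorter than the first row (grid[i][j] out of range).
def Pre_max_positive_rectangle (grid : List (List Int)) : Prop :=
  grid ≠ [] ∧ ∀ r ∈ grid, (grid.headD []).length ≤ r.length
instance (grid : List (List Int)) : Decidable (Pre_max_positive_rectangle grid) := by
  unfold Pre_max_positive_rectangle; infer_instance
def pvWitness_max_positive_rectangle : List (List Int) := [[1, -2], [0, 3]]
def Spec_max_positive_rectangle (grid : List (List Int)) (out : Int) : Prop := out = max_positive_rectangle_alt grid
instance (grid : List (List Int)) (out : Int) : Decidable (Spec_max_positive_rectangle grid out) := by unfold Spec_max_positive_rectangle; infer_instance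

-- ===== CLAIM (what is proved, stated in full; the proofs are below) =====
def Claim_equal_max_positive_rectangle : Prop := ∀ (grid : List (List Int)), Dom_max_positive_rectangle grid → Pre_max_positive_rectangle grid → Spec_max_positive_rectangle grid (max_positive_rectangle grid)

-- ===== LEMMAS AND PROOFS =====

-- the cell value grid[i][j] (total form; in range wherever the programs read it under Pre_)
def prGv (grid : List (List Int)) (i j : Int) : Int :=
  PySem.List.pyGetD (PySem.List.pyGetD grid i []) j 0

-- "the rectangle rows r1..r2, columns c1..c2 is all positive"
def prAP (grid : List (List Int)) (r1 r2 c1 c2 : Int) : Prop :=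
  ∀ i j : Int, r1 ≤ i → i ≤ r2 → c1 ≤ j → j ≤ c2 → 0 < prGv grid i j

-- number of columns A and B both use
def prM (grid : List (List Int)) : Nat := (PySem.List.pyGetD grid 0 []).length

-- a value either is -1 or is the area of some all-positive in-bounds rectangle
def prGood (grid : List (List Int)) (v : Int) : Prop :=
  v = -1 ∨ ∃ r1 r2 c1 c2 : Int, 0 ≤ r1 ∧ r1 ≤ r2 ∧ r2 < (grid.length : Int) ∧
    0 ≤ c1 ∧ c1 ≤ c2 ∧ c2 < (prM grid : Int) ∧ prAP grid r1 r2 c1 c2 ∧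
    v = (r2 - r1 + 1) * (c2 - c1 + 1)

-- a value at least the area of every all-positive in-bounds rectangle
def prDom (grid : List (List Int)) (v : Int) : Prop :=
  ∀ r1 r2 c1 c2 : Int, 0 ≤ r1 → r1 ≤ r2 → r2 < (grid.length : Int) →
    0 ≤ c1 → c1 ≤ c2 → c2 < (prM grid : Int) → prAP grid r1 r2 c1 c2 →
    (r2 - r1 + 1) * (c2 - c1 + 1) ≤ v


-- generic: a fold whose step never decreases the accumulator is bounded below by it
lemma prFoldlGe {i : Type} (F : Int → i → Int) (h : ∀ a x, a ≤ F a x) (l : List i) (a : Int) :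
    a ≤ l.foldl F a := by
  induction l generalizing a with
  | nil => simp
  | cons x t ih => exact le_trans (h a x) (ih _)

-- generic: if some step of a non-decreasing fold pushes the accumulator above v, so is the fold
lemma prLeFoldl {i : Type} (F : Int → i → Int) (hm : ∀ a x, a ≤ F a x) {l : List i} {x : i}
    (hx : x ∈ l) {v : Int} (hv : ∀ a, v ≤ F a x) (a : Int) : v ≤ l.foldl F a := by
  induction l generalizing a with
  | nil => cases hx
  | cons y t ih =>
    rcases List.mem_cons.1 hx with rfl | hmem
    · exact le_trans (hv a) (prFoldlGe F hm t _)
    · exact ih hmem _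

-- A's verification double loop decides exactly prAP
lemma prACheck_iff (grid : List (List Int)) (sr sc er ec : Int) :
    prACheck grid sr sc er ec = true ↔ prAP grid sr er sc ec := by
  simp only [prACheck, prAP, prGv, List.all_eq_true, PySem.List.mem_pyRange_one,
    decide_eq_true_eq]
  constructor
  · intro h i j h1 h2 h3 h4; exact h i ⟨h1, by omega⟩ j ⟨h3, by omega⟩
  · intro h i hi j hj; exact h i j hi.1 (by omega) hj.1 (by omega)

lemma prAL4_ge (grid : List (List Int)) (m sr sc er acc : Int) :
    acc ≤ prAL4 grid m sr sc er acc := by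
  apply prFoldlGe; intro a ec; dsimp only; split
  · exact le_max_left _ _
  · exact le_rfl

lemma prAL3_ge (grid : List (List Int)) (n m sr sc acc : Int) :
    acc ≤ prAL3 grid n m sr sc acc :=
  prFoldlGe _ (fun a er => prAL4_ge grid m sr sc er a) _ _

lemma prAL2_ge (grid : List (List Int)) (n m sr acc : Int) :
    acc ≤ prAL2 grid n m sr acc :=
  prFoldlGe _ (fun a sc => prAL3_ge grid n m sr sc a) _ _

lemma prAL4_good (grid : List (List Int)) (sr sc er : Int) (hsr : 0 ≤ sr) (hsc : 0 ≤ sc)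
    (hser : sr ≤ er) (her : er < (grid.length : Int)) (b : Int) (hb : prGood grid b) :
    prGood grid (prAL4 grid (prM grid) sr sc er b) := by
  apply List.foldlRecOn _ _ hb
  intro a ha ec hec
  rw [PySem.List.mem_pyRange_one] at hec
  dsimp only; split
  · rename_i hchk
    rcases max_choice a ((er - sr + 1) * (ec - sc + 1)) with he | he <;> rw [he]
    · exact ha
    · exact Or.inr ⟨sr, er, sc, ec, hsr, hser, her, hsc, hec.1, hec.2,
        (prACheck_iff grid sr sc er ec).1 hchk, rfl⟩
  · exact ha

lemma prAL3_good (grid : List (List Int)) (sr sc : Int) (hsr : 0 ≤ sr) (hsc : 0 ≤ sc)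
    (b : Int) (hb : prGood grid b) :
    prGood grid (prAL3 grid grid.length (prM grid) sr sc b) := by
  apply List.foldlRecOn _ _ hb
  intro a ha er her
  rw [PySem.List.mem_pyRange_one] at her
  exact prAL4_good grid sr sc er hsr hsc her.1 her.2 a ha

lemma prAL2_good (grid : List (List Int)) (sr : Int) (hsr : 0 ≤ sr) (b : Int)
    (hb : prGood grid b) : prGood grid (prAL2 grid grid.length (prM grid) sr b) := by
  apply List.foldlRecOn _ _ hb
  intro a ha sc hsc
  rw [PySem.List.mem_pyRange_one] at hsc
  exact prAL3_good grid sr sc hsr hsc.1 a ha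

lemma prA_ge (grid : List (List Int)) : -1 ≤ max_positive_rectangle grid := by
  simp only [max_positive_rectangle]
  exact prFoldlGe _ (fun a sr => prAL2_ge grid _ _ sr a) _ _

lemma prA_good (grid : List (List Int)) : prGood grid (max_positive_rectangle grid) := by
  simp only [max_positive_rectangle]
  have hm : (PySem.List.pyGetD grid 0 ([] : List Int)).length = prM grid := rfl
  rw [hm]
  apply List.foldlRecOn (motive := prGood grid) _ _ (Or.inl rfl)
  intro b hb sr hsr
  rw [PySem.List.mem_pyRange_one] at hsr
  exact prAL2_good grid sr hsr.1 b hb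

lemma prA_dom (grid : List (List Int)) : prDom grid (max_positive_rectangle grid) := by
  intro r1 r2 c1 c2 h1 h2 h3 h4 h5 h6 hap
  simp only [max_positive_rectangle]
  have hm : (PySem.List.pyGetD grid 0 ([] : List Int)).length = prM grid := rfl
  rw [hm]
  have hchk : prACheck grid r1 c1 r2 c2 = true := (prACheck_iff grid r1 c1 r2 c2).2 hap
  apply prLeFoldl _ (fun a sr => prAL2_ge grid _ _ sr a)
    (PySem.List.mem_pyRange_one.2 ⟨h1, by omega⟩)
  intro a
  apply prLeFoldl _ (fun a sc => prAL3_ge grid _ _ _ sc a)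
    (PySem.List.mem_pyRange_one.2 ⟨h4, by omega⟩)
  intro a
  apply prLeFoldl _ (fun a er => prAL4_ge grid _ _ _ er a)
    (PySem.List.mem_pyRange_one.2 ⟨h2, by omega⟩)
  intro a
  apply prLeFoldl _ (fun a ec => by split <;> simp)
    (PySem.List.mem_pyRange_one.2 ⟨h5, by omega⟩)
  intro a
  simp only [hchk, if_true]
  exact le_max_right _ _

lemma prBScan_ge (h b : Int) (ok : List Bool) : b ≤ (prBScan h b ok).2 := by
  unfold prBScan
  apply List.foldlRecOn (motive := fun rb : Int × Int => b ≤ rb.2) _ _ le_rfl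
  intro rb hrb o _
  dsimp only; split
  · dsimp only; split
    · rename_i hc; exact le_of_lt (lt_of_le_of_lt hrb hc)
    · exact hrb
  · exact hrb

lemma prBTop_ge (grid : List (List Int)) (n m best top : Int) :
    best ≤ prBTop grid n m best top := by
  unfold prBTop
  apply List.foldlRecOn (motive := fun st : Int × List Bool => best ≤ st.1) _ _ le_rfl
  intro st hst bottom _
  unfold prBRow
  exact le_trans hst (prBScan_ge _ _ _)

lemma prB_ge (grid : List (List Int)) : -1 ≤ max_positive_rectangle_alt grid := by
  simp only [max_positive_rectangle_alt]
  exact prFoldlGe _ (fun a top => prBTop_ge grid _ _ a top) _ _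

-- invariant of B's run/best scan over one row of column flags: the run counter is the
-- length of the maximal true-suffix, and best accumulates exactly the widths*h of
-- true intervals, dominating all of them
lemma prBScan_inv (h : Int) (hh : 1 ≤ h) (ok : List Bool) (b : Int) :
    0 ≤ (prBScan h b ok).1 ∧ (prBScan h b ok).1 ≤ (ok.length : Int) ∧
    (∀ t : Nat, t < ok.length → (ok.length : Int) - (prBScan h b ok).1 ≤ t → ok.getD t false = true) ∧
    (∀ c1 : Nat, c1 < ok.length → (∀ t : Nat, c1 ≤ t → t < ok.length → ok.getD t false = true) →
      (ok.length : Int) - c1 ≤ (prBScan h b ok).1) ∧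
    b ≤ (prBScan h b ok).2 ∧
    ((prBScan h b ok).2 = b ∨ ∃ c1 c2 : Nat, c1 ≤ c2 ∧ c2 < ok.length ∧
      (∀ t : Nat, c1 ≤ t → t ≤ c2 → ok.getD t false = true) ∧
      (prBScan h b ok).2 = ((c2 : Int) - c1 + 1) * h) ∧
    (∀ c1 c2 : Nat, c1 ≤ c2 → c2 < ok.length →
      (∀ t : Nat, c1 ≤ t → t ≤ c2 → ok.getD t false = true) →
      ((c2 : Int) - c1 + 1) * h ≤ (prBScan h b ok).2) := by
  induction ok using List.reverseRecOn with
  | nil =>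
    refine ⟨le_rfl, le_rfl, ?_, ?_, le_rfl, Or.inl rfl, ?_⟩
    · intro t ht; simp at ht
    · intro c1 hc1; simp at hc1
    · intro c1 c2 hcc hc2; simp at hc2
  | append_singleton p o ih =>
    obtain ⟨ih1, ih2, ih3, ih4, ih5, ih6, ih7⟩ := ih
    have hstep : prBScan h b (p ++ [o]) =
        (fun (rb : Int × Int) o => if o then
            ((rb.1 + 1 : Int), if (rb.1 + 1) * h > rb.2 then (rb.1 + 1) * h else rb.2)
          else ((0 : Int), rb.2)) (prBScan h b p) o := by
      simp [prBScan, List.foldl_append]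
    set acc := prBScan h b p with hacc
    have hgetlt : ∀ t : Nat, t < p.length → (p ++ [o]).getD t false = p.getD t false :=
      fun t ht => List.getD_append p [o] false t ht
    have hgetlast : (p ++ [o]).getD p.length false = o := by
      simp [List.getD_eq_getElem?_getD]
    have hlen : (p ++ [o]).length = p.length + 1 := by simp
    rw [hstep]
    cases o with
    | false =>
      dsimp only
      refine ⟨le_rfl, by simp; omega, ?_, ?_, ih5, ?_, ?_⟩
      · intro t ht1 ht2; exfalso; rw [hlen] at ht1 ht2; push_cast at ht2; omega
      · intro c1 hc1 hall; exfalso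
        rw [hlen] at hc1
        have := hall p.length (by omega) (by omega)
        rw [hgetlast] at this; exact Bool.false_ne_true this
      · rcases ih6 with h6 | ⟨c1, c2, hcc, hc2, hall, hv⟩
        · exact Or.inl h6
        · exact Or.inr ⟨c1, c2, hcc, by omega, fun t h1 h2 => by
            rw [hgetlt t (by omega)]; exact hall t h1 h2, hv⟩
      · intro c1 c2 hcc hc2 hall
        rw [hlen] at hc2
        rcases Nat.lt_or_ge c2 p.length with hlt | hge
        · exact ih7 c1 c2 hcc hlt (fun t h1 h2 => by
            rw [← hgetlt t (by omega)]; exact hall t h1 h2)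
        · exfalso
          have hc2e : c2 = p.length := by omega
          have := hall c2 hcc le_rfl
          rw [hc2e, hgetlast] at this; exact Bool.false_ne_true this
    | true =>
      simp only [reduceIte]
      have hnew3 : ∀ t : Nat, t < (p ++ [true]).length →
          ((p ++ [true]).length : Int) - (acc.1 + 1) ≤ t → (p ++ [true]).getD t false = true := by
        intro t ht1 ht2
        rw [hlen] at ht1; rw [hlen] at ht2; push_cast at ht2
        rcases Nat.lt_or_ge t p.length with hlt | hge
        · rw [hgetlt t hlt]; exact ih3 t hlt (by omega)
        · have : t = p.length := by omega
          rw [this, hgetlast]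
      have hnew4 : ∀ c1 : Nat, c1 < (p ++ [true]).length →
          (∀ t : Nat, c1 ≤ t → t < (p ++ [true]).length → (p ++ [true]).getD t false = true) →
          ((p ++ [true]).length : Int) - c1 ≤ acc.1 + 1 := by
        intro c1 hc1 hall
        rw [hlen] at hc1 ⊢; push_cast
        rcases Nat.lt_or_ge c1 p.length with hlt | hge
        · have := ih4 c1 hlt (fun t h1 h2 => by
            rw [← hgetlt t h2]; exact hall t h1 (by omega))
          omega
        · omega
      refine ⟨by omega, ?_, hnew3, hnew4, ?_, ?_, ?_⟩
      · rw [hlen]; push_cast; omega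
      · split
        · rename_i hc; exact le_of_lt (lt_of_le_of_lt ih5 hc)
        · exact ih5
      · split
        · rename_i hc
          refine Or.inr ⟨p.length - acc.1.toNat, p.length, by omega, by rw [hlen]; omega, ?_, ?_⟩
          · intro t h1 h2
            rcases Nat.lt_or_ge t p.length with hlt | hge
            · rw [hgetlt t hlt]; exact ih3 t hlt (by omega)
            · have : t = p.length := by omega
              rw [this, hgetlast]
          · have he : ((p.length : Int) - (p.length - acc.1.toNat : Nat) + 1) = acc.1 + 1 := by omega
            rw [he]
        · rcases ih6 with h6 | ⟨c1, c2, hcc, hc2, hall, hv⟩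
          · exact Or.inl h6
          · exact Or.inr ⟨c1, c2, hcc, by rw [hlen]; omega, fun t h1 h2 => by
              rw [hgetlt t (by omega)]; exact hall t h1 h2, hv⟩
      · intro c1 c2 hcc hc2 hall
        rw [hlen] at hc2
        rcases Nat.lt_or_ge c2 p.length with hlt | hge
        · have hle := ih7 c1 c2 hcc hlt (fun t h1 h2 => by
            rw [← hgetlt t (by omega)]; exact hall t h1 h2)
          split
          · rename_i hc; exact le_of_lt (lt_of_le_of_lt hle hc)
          · exact hle
        · have hc2e : c2 = p.length := by omega
          subst hc2e
          have hmax : (p.length : Int) - c1 ≤ acc.1 := by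
            rcases Nat.lt_or_ge c1 p.length with hl | hg
            · exact ih4 c1 hl (fun t h1 h2 => by
                rw [← hgetlt t h2]; exact hall t h1 (by omega))
            · omega
          have harea : ((p.length : Int) - c1 + 1) * h ≤ (acc.1 + 1) * h :=
            mul_le_mul_of_nonneg_right (by omega) (by omega)
          split
          · rename_i hc; exact harea
          · rename_i hc; exact le_trans harea (not_lt.1 hc)

-- the column flags B maintains: after cnt rows below `top`, flag j says
-- "rows top..top+cnt-1 are positive in column j"
def prOkL (grid : List (List Int)) (top : Int) (cnt : Nat) : List Bool :=
  (List.range (prM grid)).map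
    (fun (j : Nat) => decide (∀ k : Nat, k < cnt → 0 < prGv grid (top + (k : Int)) (j : Int)))

lemma prOkL_length (grid : List (List Int)) (top : Int) (cnt : Nat) :
    (prOkL grid top cnt).length = prM grid := by simp [prOkL]

lemma prOkL_zero (grid : List (List Int)) (top : Int) :
    prOkL grid top 0 = List.replicate (prM grid) true := by
  simp [prOkL, List.map_const']

lemma prOkL_getElem (grid : List (List Int)) (top : Int) (cnt : Nat) (j : Nat)
    (hj : j < (prOkL grid top cnt).length) :
    (prOkL grid top cnt)[j] = decide (∀ k : Nat, k < cnt → 0 < prGv grid (top + k) j) := by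
  simp only [prOkL, List.getElem_map, List.getElem_range]

lemma prOkL_getD (grid : List (List Int)) (top : Int) (cnt : Nat) (j : Nat)
    (hj : j < prM grid) :
    (prOkL grid top cnt).getD j false =
      decide (∀ k : Nat, k < cnt → 0 < prGv grid (top + k) j) := by
  rw [List.getD_eq_getElem _ _ (by rw [prOkL_length]; exact hj), prOkL_getElem]

lemma prM_eq_headD (grid : List (List Int)) : prM grid = (grid.headD []).length := by
  cases grid <;> simp [prM, PySem.List.pyGetD_zero]

lemma prRow_length (grid : List (List Int)) (hp : Pre_max_positive_rectangle grid)
    (bt : Int) (h0 : 0 ≤ bt) (hlt : bt < (grid.length : Int)) :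
    prM grid ≤ (PySem.List.pyGetD grid bt []).length := by
  have hmem : PySem.List.pyGetD grid bt [] ∈ grid :=
    PySem.List.pyGetD_mem grid [] (by simp [PySem.Raise.InRange]; omega)
  rw [prM_eq_headD]
  exact hp.2 _ hmem

-- updating the flags with one more row is B's zip/map comprehension
lemma prOkL_step (grid : List (List Int)) (hp : Pre_max_positive_rectangle grid)
    (top : Int) (cnt : Nat) (h0 : 0 ≤ top) (hlt : top + cnt < (grid.length : Int)) :
    ((prOkL grid top cnt).zip (PySem.List.pyGetD grid (top + cnt) [])).map
        (fun p => p.1 && decide (0 < p.2)) = prOkL grid top (cnt + 1) := by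
  have hrl : prM grid ≤ (PySem.List.pyGetD grid (top + cnt) []).length :=
    prRow_length grid hp (top + cnt) (by omega) hlt
  apply List.ext_getElem
  · simp [prOkL_length, List.length_zip]; omega
  · intro j h1 h2
    have hj : j < prM grid := by rw [prOkL_length] at h2; exact h2
    have hjr : j < (PySem.List.pyGetD grid (top + cnt) []).length := by omega
    simp only [List.getElem_map, List.getElem_zip]
    have hrow : (PySem.List.pyGetD grid (top + cnt) [])[j]'hjr =
        prGv grid (top + cnt) j := by
      rw [prGv, PySem.List.pyGetD_natCast, List.getD_eq_getElem _ _ hjr]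
    rw [prOkL_getElem _ _ _ _ (by rw [prOkL_length]; exact hj),
      prOkL_getElem _ _ _ _ (by rw [prOkL_length]; exact hj)]
    rw [← Bool.decide_and, decide_eq_decide]
    constructor
    · rintro ⟨hP, hQ⟩ k hk
      rcases Nat.lt_succ_iff_lt_or_eq.1 hk with hk' | rfl
      · exact hP k hk'
      · rw [← hrow]; exact hQ
    · intro hR
      refine ⟨fun k hk => hR k (by omega), ?_⟩
      rw [hrow]; exact hR cnt (by omega)

-- interval of true flags = all-positive rectangle rows top..top+cnt, given columns
lemma prOkL_interval (grid : List (List Int)) (top : Int) (cnt : Nat) (c1 c2 : Nat)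
    (hc2 : c2 < prM grid) :
    (∀ t : Nat, c1 ≤ t → t ≤ c2 → (prOkL grid top (cnt + 1)).getD t false = true) ↔
      prAP grid top (top + cnt) c1 c2 := by
  constructor
  · intro hall i j hi1 hi2 hj1 hj2
    have hj0 : 0 ≤ j := le_trans (by positivity) hj1
    have ht : j.toNat ≤ c2 := by omega
    have ht1 : c1 ≤ j.toNat := by omega
    have := hall j.toNat ht1 ht
    rw [prOkL_getD _ _ _ _ (by omega)] at this
    have hk := of_decide_eq_true this (i - top).toNat (by omega)
    have e1 : (top + ((i - top).toNat : Int)) = i := by omega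
    have e2 : ((j.toNat : Nat) : Int) = j := by omega
    rwa [e1, e2] at hk
  · intro hap t h1 h2
    rw [prOkL_getD _ _ _ _ (by omega)]
    apply decide_eq_true
    intro k hk
    exact hap (top + k) t (by omega) (by omega) (by omega) (by omega)

-- the fold B runs from row bt down, starting from the flags for rows top..bt-1
def prBF (grid : List (List Int)) (top bt b : Int) : Int × List Bool :=
  (PySem.List.pyRange bt (grid.length : Int) 1).foldl (prBRow grid top)
    (b, prOkL grid top (bt - top).toNat)

-- invariant of B's bottom loop: its best is monotone, achieved by an all-positive
-- rectangle with top row `top`, and dominates all such rectangles with bottom ≥ bt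
lemma prBfold (grid : List (List Int)) (hp : Pre_max_positive_rectangle grid)
    (top : Int) (h0 : 0 ≤ top) :
    ∀ (k : Nat) (bt : Int), top ≤ bt → bt ≤ (grid.length : Int) →
      ((grid.length : Int) - bt).toNat = k → ∀ b : Int,
      b ≤ (prBF grid top bt b).1 ∧
      ((prBF grid top bt b).1 = b ∨
        ∃ r2 c1 c2 : Int, top ≤ r2 ∧ bt ≤ r2 ∧ r2 < (grid.length : Int) ∧ 0 ≤ c1 ∧
          c1 ≤ c2 ∧ c2 < (prM grid : Int) ∧ prAP grid top r2 c1 c2 ∧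
          (prBF grid top bt b).1 = (r2 - top + 1) * (c2 - c1 + 1)) ∧
      (∀ r2 c1 c2 : Int, bt ≤ r2 → r2 < (grid.length : Int) → 0 ≤ c1 → c1 ≤ c2 →
        c2 < (prM grid : Int) → prAP grid top r2 c1 c2 →
        (r2 - top + 1) * (c2 - c1 + 1) ≤ (prBF grid top bt b).1) := by
  intro k
  induction k with
  | zero =>
    intro bt h1 h2 h3 b
    have hbt : bt = (grid.length : Int) := by omega
    unfold prBF
    rw [hbt, PySem.List.pyRange_one_eq_nil le_rfl, List.foldl_nil]
    refine ⟨le_rfl, Or.inl rfl, ?_⟩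
    intro r2 c1 c2 hr1 hr2
    omega
  | succ k ih =>
    intro bt h1 h2 h3 b
    have hlt : bt < (grid.length : Int) := by omega
    set cnt := (bt - top).toNat with hcnt
    have hbtc : bt = top + cnt := by omega
    have hok : ((prOkL grid top cnt).zip (PySem.List.pyGetD grid bt [])).map
        (fun p => p.1 && decide (0 < p.2)) = prOkL grid top (cnt + 1) := by
      rw [hbtc]
      exact prOkL_step grid hp top cnt h0 (by omega)
    have hstep : prBRow grid top (b, prOkL grid top cnt) bt =
        ((prBScan (bt - top + 1) b (prOkL grid top (cnt + 1))).2,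
          prOkL grid top (cnt + 1)) := by
      unfold prBRow
      dsimp only
      rw [hok]
    set b' := (prBScan (bt - top + 1) b (prOkL grid top (cnt + 1))).2 with hb'
    have hfe : prBF grid top bt b = prBF grid top (bt + 1) b' := by
      unfold prBF
      rw [PySem.List.pyRange_one_cons hlt, List.foldl_cons, hstep]
      have e : ((bt + 1) - top).toNat = cnt + 1 := by omega
      rw [e]
    obtain ⟨ih1, ih2, ih3⟩ := ih (bt + 1) (by omega) (by omega) (by omega) b'
    obtain ⟨_, _, _, _, s5, s6, s7⟩ :=
      prBScan_inv (bt - top + 1) (by omega) (prOkL grid top (cnt + 1)) b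
    rw [← hb'] at s5 s6 s7
    rw [prOkL_length] at s6 s7
    refine ⟨?_, ?_, ?_⟩
    · rw [hfe]; exact le_trans s5 ih1
    · rw [hfe]
      rcases ih2 with heq | ⟨r2, c1, c2, g1, g2, g3, g4, g5, g6, g7, g8⟩
      · rcases s6 with h6 | ⟨c1, c2, hcc, hc2, hall, hv⟩
        · exact Or.inl (heq.trans h6)
        · refine Or.inr ⟨bt, c1, c2, h1, le_rfl, hlt, by positivity, by exact_mod_cast hcc,
            by exact_mod_cast hc2, ?_, ?_⟩
          · rw [hbtc]
            exact (prOkL_interval grid top cnt c1 c2 hc2).1 hall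
          · rw [heq, hv]; ring
      · exact Or.inr ⟨r2, c1, c2, g1, by omega, g3, g4, g5, g6, g7, g8⟩
    · intro r2 c1 c2 hr1 hr2 hc1 hc2 hc3 hap
      rw [hfe]
      rcases lt_or_ge r2 (bt + 1) with hcase | hcase
      · have hr2e : r2 = bt := by omega
        rw [hr2e] at hap ⊢
        have hint : ∀ t : Nat, c1.toNat ≤ t → t ≤ c2.toNat →
            (prOkL grid top (cnt + 1)).getD t false = true := by
          apply (prOkL_interval grid top cnt c1.toNat c2.toNat (by omega)).2
          rw [← hbtc]
          intro i j hi1 hi2 hj1 hj2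
          exact hap i j hi1 hi2 (by omega) (by omega)
        have hle := s7 c1.toNat c2.toNat (by omega) (by omega) hint
        have e : ((c2.toNat : Int) - (c1.toNat : Int) + 1) * (bt - top + 1) =
            (bt - top + 1) * (c2 - c1 + 1) := by
          have e1 : ((c2.toNat : Int)) = c2 := by omega
          have e2 : ((c1.toNat : Int)) = c1 := by omega
          rw [e1, e2]; ring
        rw [e] at hle
        exact le_trans hle ih1
      · exact ih3 r2 c1 c2 hcase hr2 hc1 hc2 hc3 hap

lemma prBTop_eq (grid : List (List Int)) (b top : Int) :
    prBTop grid (grid.length : Int) ((prM grid : Nat) : Int) b top =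
      (prBF grid top top b).1 := by
  unfold prBTop prBF
  rw [Int.toNat_natCast, show ((top - top).toNat) = 0 from by omega, prOkL_zero]

lemma prB_good (grid : List (List Int)) (hp : Pre_max_positive_rectangle grid) :
    prGood grid (max_positive_rectangle_alt grid) := by
  simp only [max_positive_rectangle_alt]
  have hm : (PySem.List.pyGetD grid 0 ([] : List Int)).length = prM grid := rfl
  rw [hm]
  apply List.foldlRecOn (motive := prGood grid) _ _ (Or.inl rfl)
  intro bcur hb top htop
  rw [PySem.List.mem_pyRange_one] at htop
  rw [prBTop_eq grid bcur top]
  obtain ⟨f1, f2, f3⟩ := prBfold grid hp top htop.1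
    (((grid.length : Int) - top).toNat) top le_rfl (by omega) rfl bcur
  rcases f2 with heq | ⟨r2, c1, c2, g1, g2, g3, g4, g5, g6, g7, g8⟩
  · rw [heq]; exact hb
  · exact Or.inr ⟨top, r2, c1, c2, htop.1, g1, g3, g4, g5, g6, g7, g8⟩

lemma prB_dom (grid : List (List Int)) (hp : Pre_max_positive_rectangle grid) :
    prDom grid (max_positive_rectangle_alt grid) := by
  intro r1 r2 c1 c2 h1 h2 h3 h4 h5 h6 hap
  simp only [max_positive_rectangle_alt]
  have hm : (PySem.List.pyGetD grid 0 ([] : List Int)).length = prM grid := rfl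
  rw [hm]
  apply prLeFoldl _ (fun a top => prBTop_ge grid _ _ a top)
    (PySem.List.mem_pyRange_one.2 ⟨h1, by omega⟩)
  intro a
  rw [prBTop_eq grid a r1]
  obtain ⟨f1, f2, f3⟩ := prBfold grid hp r1 h1
    (((grid.length : Int) - r1).toNat) r1 le_rfl (by omega) rfl a
  exact f3 r2 c1 c2 h2 h3 h4 h5 h6 hap

-- ===== VERDICT (by name: the statement is the Claim_ definition above) =====
theorem max_positive_rectangle_spec : Claim_equal_max_positive_rectangle := by
  intro grid _ hp
  unfold Spec_max_positive_rectangle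
  apply le_antisymm
  · rcases prA_good grid with h | ⟨r1, r2, c1, c2, h1, h2, h3, h4, h5, h6, hap, hv⟩
    · rw [h]; exact prB_ge grid
    · rw [hv]; exact prB_dom grid hp r1 r2 c1 c2 h1 h2 h3 h4 h5 h6 hap
  · rcases prB_good grid hp with h | ⟨r1, r2, c1, c2, h1, h2, h3, h4, h5, h6, hap, hv⟩
    · rw [h]; exact prA_ge grid
    · rw [hv]; exact prA_dom grid r1 r2 c1 c2 h1 h2 h3 h4 h5 h6 hap
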